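-- pv_equiv track=rewrite | github.com/EpicGuy4000/advent-of-code | 2024/day_05/__init__.py | part_1
-- ===== SOURCE A (Python) =====
-- def part_1(input: tuple[dict[int, list], list[list[int]]]) -> int:
--
--     rules, updates = input
--     result = 0
--     for update in updates:
--         success = True
--         for key in rules.keys():
--             if key in update:
--                 key_index = update.index(key)
--                 for rule in rules[key]:
--                     if rule in update[key_index+1:]:
--                         success = False
--                         break
--                 if not success:
--                     break
--
--         if success:
--             result += update[(len(update)//2)]
--
--     return result
-- ===== SOURCE B (Python) =====
-- def part_1(input: tuple[dict[int, list], list[list[int]]]) -> int: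
--     rules, updates = input
--     # reverse index built ONCE: must_precede[v] = keys that must come before... actually
--     # keys k whose successors include v, i.e. v may not appear after k has been seen.
--     blockers = {}
--     for k, vals in rules.items():
--         for r in vals:
--             blockers.setdefault(r, []).append(k)
--     total = 0
--     for update in updates:
--         seen = set()
--         ok = True
--         for v in update:
--             if any(k in seen for k in blockers.get(v, ())):
--                 ok = False
--                 break
--             seen.add(v)
--         if ok:
--             total += update[len(update) // 2]
--     return total
-- ===== Notes on version B (the rewrite author's own statement) =====
-- stated objective: faster
-- what changed: B inverts the rule table once into a global reverse index (value -> keys it must not follow) and then validates each update in a single forward streaming pass with a growing 'seen' set and early exit, instead of A's per-update loop over all rule keys with list membership, .index and a suffix scan per rule value.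
import Mathlib
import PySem

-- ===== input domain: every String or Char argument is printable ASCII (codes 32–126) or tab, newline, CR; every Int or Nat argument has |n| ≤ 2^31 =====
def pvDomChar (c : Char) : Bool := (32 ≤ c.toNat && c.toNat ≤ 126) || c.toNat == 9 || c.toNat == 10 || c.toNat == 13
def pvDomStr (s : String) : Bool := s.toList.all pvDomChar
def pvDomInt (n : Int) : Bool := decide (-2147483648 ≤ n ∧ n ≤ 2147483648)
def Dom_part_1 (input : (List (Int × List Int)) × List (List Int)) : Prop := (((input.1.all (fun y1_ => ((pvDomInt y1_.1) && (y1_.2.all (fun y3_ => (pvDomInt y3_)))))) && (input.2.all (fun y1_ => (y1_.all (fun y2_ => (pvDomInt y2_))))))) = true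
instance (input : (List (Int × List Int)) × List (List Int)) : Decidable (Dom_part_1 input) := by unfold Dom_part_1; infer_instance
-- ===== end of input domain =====

-- B inverts the rule table once into a reverse index (value -> keys it may not follow) and
-- validates each update in ONE forward pass with a growing 'seen' set, instead of A's
-- per-update scan over every rule key with .index and a suffix-membership scan per rule (faster).

-- ===== PORT A =====
-- inner `for rule in rules[key]` with break: False as soon as a rule value occurs after key
def aInnerLoop : List Int → List Int → Bool
  | [], _ => true
  | rule :: rest, suffix =>
    if suffix.contains rule then false else aInnerLoop rest suffix

-- `for key in rules.keys()` with break (a Python dict has unique keys, so iterating the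
-- association-list pairs and using the pair's value as rules[key] is exact)
def aKeyLoop (update : List Int) : List (Int × List Int) → Bool
  | [] => true
  | (key, vals) :: rest =>
    if update.contains key then
      let keyIndex : Nat := (PySem.List.index? update key).getD 0
      if aInnerLoop vals (PySem.List.slice update (some ((keyIndex : Int) + 1)) none) then
        aKeyLoop update rest
      else false
    else aKeyLoop update rest

def part_1 (input : (List (Int × List Int)) × List (List Int)) : Int :=
  input.2.foldl (fun result update =>
    if aKeyLoop update input.1 then
      result + PySem.List.pyGetD update (PySem.Int.floordiv (PySem.List.len update) 2) 0
    else result) 0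

-- ===== PORT B =====
-- `blockers.setdefault(r, []).append(k)` over all pairs: reverse index value -> keys
def bRev (rules : List (Int × List Int)) : PySem.Dict Int (List Int) :=
  rules.foldl (fun d kv =>
    kv.2.foldl (fun d r => d.insert r (d.getD r [] ++ [kv.1])) d) PySem.Dict.empty

-- `for v in update` with break: fail as soon as some blocker of v has already been seen
def bScan (blockers : PySem.Dict Int (List Int)) : List Int → PySem.Set Int → Bool
  | [], _ => true
  | v :: rest, seen =>
    if (blockers.getD v []).any (fun k => PySem.Set.contains seen k) then false
    else bScan blockers rest (PySem.Set.add seen v)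

def part_1_alt (input : (List (Int × List Int)) × List (List Int)) : Int :=
  let blockers := bRev input.1
  input.2.foldl (fun total update =>
    if bScan blockers update PySem.Set.empty then
      total + PySem.List.pyGetD update (PySem.Int.floordiv (PySem.List.len update) 2) 0
    else total) 0

-- ===== PRECONDITION & SPEC =====
-- Pre_ excludes inputs containing an empty update: there `update[len(update)//2]` raises
-- IndexError in Python A (and in B), since an empty update always passes the check.
def Pre_part_1 (input : (List (Int × List Int)) × List (List Int)) : Prop :=
  ∀ u ∈ input.2, u ≠ []
instance (input : (List (Int × List Int)) × List (List Int)) : Decidable (Pre_part_1 input) := by unfold Pre_part_1; infer_instance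

def pvWitness_part_1 : ((List (Int × List Int)) × List (List Int)) :=
  ([(47, [53, 13]), (53, [13])], [[47, 53, 13], [13, 53, 47], [53]])

def Spec_part_1 (input : (List (Int × List Int)) × List (List Int)) (out : Int) : Prop := out = part_1_alt input
instance (input : (List (Int × List Int)) × List (List Int)) (out : Int) : Decidable (Spec_part_1 input out) := by unfold Spec_part_1; infer_instance

-- ===== CLAIM (what is proved, stated in full; the proofs are below) =====
def Claim_equal_part_1 : Prop := ∀ (input : (List (Int × List Int)) × List (List Int)), Dom_part_1 input → Pre_part_1 input → Spec_part_1 input (part_1 input)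

-- ===== LEMMAS AND PROOFS =====

-- A's inner break-loop is the conjunction over the rule values
theorem aInnerLoop_eq_all (vals suffix : List Int) :
    aInnerLoop vals suffix = vals.all (fun r => !suffix.contains r) := by
  induction vals with
  | nil => rfl
  | cons r rest ih =>
    by_cases h : r ∈ suffix
    · simp [aInnerLoop, h]
    · simp [aInnerLoop, h, ih]

-- A's key loop with break is the conjunction over the rule pairs
theorem aKeyLoop_eq_all (u : List Int) (rules : List (Int × List Int)) :
    aKeyLoop u rules = rules.all (fun kv =>
      if u.contains kv.1 then
        aInnerLoop kv.2 (PySem.List.slice u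
          (some ((((PySem.List.index? u kv.1).getD 0 : Nat) : Int) + 1)) none)
      else true) := by
  induction rules with
  | nil => rfl
  | cons kv rest ih =>
    obtain ⟨k, vals⟩ := kv
    simp only [aKeyLoop, List.all_cons, ← ih]
    by_cases hc : u.contains k = true
    · by_cases hi : aInnerLoop vals (PySem.List.slice u
        (some ((((PySem.List.index? u k).getD 0 : Nat) : Int) + 1)) none) = true
      · rw [if_pos hc, if_pos hi, if_pos hc, hi, Bool.true_and]
      · have hi' : aInnerLoop vals (PySem.List.slice u
          (some ((((PySem.List.index? u k).getD 0 : Nat) : Int) + 1)) none) = false :=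
          Bool.eq_false_iff.mpr hi
        rw [if_pos hc, if_neg hi, if_pos hc, hi', Bool.false_and]
    · rw [if_neg hc, if_neg hc, Bool.true_and]

-- splitting a list at a given occurrence determines the suffix by its prefix length
theorem drop_decomp (pre suf : List Int) (k : Int) :
    (pre ++ k :: suf).drop (pre.length + 1) = suf := by
  have : pre ++ k :: suf = (pre ++ [k]) ++ suf := by simp
  rw [this]
  have hl : pre.length + 1 = (pre ++ [k]).length := by simp
  rw [hl, List.drop_left]

-- the common mathematical reading of both checks, first-occurrence form (A's shape)
def APred (rules : List (Int × List Int)) (u : List Int) : Prop :=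
  ∀ kv ∈ rules, ∀ pre suf : List Int, u = pre ++ kv.1 :: suf → kv.1 ∉ pre →
    ∀ r ∈ kv.2, r ∉ suf

-- occurrence form (B's shape): no rule key may appear strictly before a value it precedes
def BPred (rules : List (Int × List Int)) (u : List Int) : Prop :=
  ∀ p : List Int, ∀ v : Int, ∀ s : List Int, u = p ++ v :: s →
    ∀ kv ∈ rules, v ∈ kv.2 → kv.1 ∉ p

theorem perKey_iff (u : List Int) (k : Int) (vals : List Int) :
    (if u.contains k then
        aInnerLoop vals (PySem.List.slice u
          (some ((((PySem.List.index? u k).getD 0 : Nat) : Int) + 1)) none)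
      else true) = true
    ↔ ∀ pre suf : List Int, u = pre ++ k :: suf → k ∉ pre → ∀ r ∈ vals, r ∉ suf := by
  by_cases hc : k ∈ u
  · rw [if_pos (by simpa using hc)]
    obtain ⟨i, hi⟩ := Option.isSome_iff_exists.mp ((PySem.List.index?_isSome_iff u k).mpr hc)
    have hslice : PySem.List.slice u (some ((((PySem.List.index? u k).getD 0 : Nat) : Int) + 1)) none
        = u.drop (i + 1) := by
      rw [hi, Option.getD_some]
      have : ((i : Nat) : Int) + 1 = ((i + 1 : Nat) : Int) := by push_cast; ring
      rw [this, PySem.List.slice_from_natCast]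
    rw [hslice, aInnerLoop_eq_all, List.all_eq_true]
    obtain ⟨pre0, suf0, hu0, hlen0, hnp0⟩ := (PySem.List.index?_eq_some_iff u k i).mp hi
    constructor
    · intro H pre suf hu hnp r hr hrsuf
      have hidx : PySem.List.index? u k = some pre.length :=
        (PySem.List.index?_eq_some_iff u k pre.length).mpr ⟨pre, suf, hu, rfl, hnp⟩
      have hpl : pre.length = i := by
        rw [hi] at hidx
        exact (Option.some_inj.mp hidx).symm
      have hsuf : u.drop (i + 1) = suf := by
        rw [hu, ← hpl, drop_decomp]
      have := H r hr
      rw [hsuf] at this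
      simp only [List.contains_eq_mem, Bool.not_eq_eq_eq_not, Bool.not_true,
        decide_eq_false_iff_not] at this
      exact this hrsuf
    · intro H r hr
      have hsuf : u.drop (i + 1) = suf0 := by
        rw [hu0, ← hlen0, drop_decomp]
      simp only [List.contains_eq_mem, Bool.not_eq_eq_eq_not, Bool.not_true,
        decide_eq_false_iff_not]
      rw [hsuf]
      exact H pre0 suf0 hu0 hnp0 r hr
  · rw [if_neg (by simpa using hc)]
    simp only [true_iff]
    intro pre suf hu hnp r hr hrsuf
    exact hc (hu ▸ (by simp : k ∈ pre ++ k :: suf))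

theorem aKeyLoop_iff (u : List Int) (rules : List (Int × List Int)) :
    aKeyLoop u rules = true ↔ APred rules u := by
  rw [aKeyLoop_eq_all, List.all_eq_true]
  unfold APred
  constructor
  · intro H kv hkv
    exact (perKey_iff u kv.1 kv.2).mp (H kv hkv)
  · intro H kv hkv
    exact (perKey_iff u kv.1 kv.2).mpr (H kv hkv)


theorem mem_revInner (key : Int) (vals : List Int) (d : PySem.Dict Int (List Int)) (r k : Int) :
    k ∈ (vals.foldl (fun d r' => d.insert r' (d.getD r' [] ++ [key])) d).getD r []
    ↔ k ∈ d.getD r [] ∨ (k = key ∧ r ∈ vals) := by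
  induction vals generalizing d with
  | nil => simp
  | cons v rest ih =>
    simp only [List.foldl_cons, ih, PySem.Dict.getD_insert]
    by_cases h : r = v
    · subst h; simp; tauto
    · simp [h]


theorem mem_bRev_aux (rules : List (Int × List Int)) (d : PySem.Dict Int (List Int)) (r k : Int) :
    k ∈ (rules.foldl (fun d kv => kv.2.foldl (fun d r' => d.insert r' (d.getD r' [] ++ [kv.1])) d) d).getD r []
    ↔ k ∈ d.getD r [] ∨ ∃ kv ∈ rules, kv.1 = k ∧ r ∈ kv.2 := by
  induction rules generalizing d with
  | nil => simp
  | cons kv rest ih =>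
    simp only [List.foldl_cons, ih, mem_revInner, List.mem_cons]
    constructor
    · rintro (((h | ⟨rfl, h⟩) | h))
      · exact Or.inl h
      · exact Or.inr ⟨kv, Or.inl rfl, rfl, h⟩
      · obtain ⟨kv', h1, h2⟩ := h
        exact Or.inr ⟨kv', Or.inr h1, h2⟩
    · rintro (h | ⟨kv', (rfl | h1), h2, h3⟩)
      · exact Or.inl (Or.inl h)
      · exact Or.inl (Or.inr ⟨h2.symm, h3⟩)
      · exact Or.inr ⟨kv', h1, h2, h3⟩


theorem mem_bRev (rules : List (Int × List Int)) (r k : Int) :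
    k ∈ (bRev rules).getD r [] ↔ ∃ kv ∈ rules, kv.1 = k ∧ r ∈ kv.2 := by
  unfold bRev
  rw [mem_bRev_aux]
  simp [PySem.Dict.getD_empty]

theorem bScan_iff (b : PySem.Dict Int (List Int)) (u : List Int) (seen : PySem.Set Int) :
    bScan b u seen = true ↔
      ∀ p : List Int, ∀ v : Int, ∀ s : List Int, u = p ++ v :: s →
        ∀ k ∈ b.getD v [], ¬(k ∈ seen ∨ k ∈ p) := by
  induction u generalizing seen with
  | nil =>
    simp only [bScan, true_iff]
    intro p v s heq
    exact absurd heq (by simp)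
  | cons v0 rest ih =>
    simp only [bScan]
    by_cases h : (b.getD v0 []).any (fun k => PySem.Set.contains seen k) = true
    · rw [if_pos h]
      constructor
      · intro hf; cases hf
      · intro H
        exfalso
        obtain ⟨k, hk, hc⟩ := List.any_eq_true.mp h
        exact H [] v0 rest rfl k hk (Or.inl ((PySem.Set.contains_iff _ _).mp hc))
    · rw [if_neg h, ih]
      constructor
      · intro H p v s heq k hk
        cases p with
        | nil =>
          simp only [List.nil_append, List.cons.injEq] at heq
          obtain ⟨rfl, rfl⟩ := heq
          rintro (hks | hkp)
          · exact (List.any_eq_true.not.mp h) ⟨k, hk, (PySem.Set.contains_iff _ _).mpr hks⟩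
          · simp at hkp
        | cons p0 p' =>
          simp only [List.cons_append, List.cons.injEq] at heq
          obtain ⟨rfl, heq'⟩ := heq
          have := H p' v s heq' k hk
          rw [PySem.Set.mem_add] at this
          rintro (hks | hkp)
          · exact this (Or.inl (Or.inl hks))
          · rcases List.mem_cons.mp hkp with rfl | hkp'
            · exact this (Or.inl (Or.inr rfl))
            · exact this (Or.inr hkp')
      · intro H p v s heq k hk
        have := H (v0 :: p) v s (by rw [heq]; rfl) k hk
        rw [PySem.Set.mem_add]
        rintro ((hks | rfl) | hkp)
        · exact this (Or.inl hks)
        · exact this (Or.inr (List.mem_cons_self ..))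
        · exact this (Or.inr (List.mem_cons_of_mem _ hkp))


theorem pred_iff (rules : List (Int × List Int)) (u : List Int) :
    APred rules u ↔ BPred rules u := by
  constructor
  · intro H p v s heq kv hkv hv2 hmem
    have hku : kv.1 ∈ u := heq ▸ List.mem_append_left _ hmem
    obtain ⟨i, hi⟩ := Option.isSome_iff_exists.mp ((PySem.List.index?_isSome_iff u kv.1).mpr hku)
    obtain ⟨pre, suf, hu, hlen, hnp⟩ := (PySem.List.index?_eq_some_iff u kv.1 i).mp hi
    have hp : p <+: u := ⟨v :: s, heq.symm⟩
    have hpre : pre <+: u := ⟨kv.1 :: suf, hu.symm⟩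
    have hlt : pre.length < p.length := by
      by_contra hle
      push Not at hle
      exact hnp ((List.prefix_of_prefix_length_le hp hpre hle).subset hmem)
    have hsuf : u.drop (pre.length + 1) = suf := by rw [hu, drop_decomp]
    have hvsuf : v ∈ suf := by
      rw [← hsuf, heq, List.drop_append_of_le_length (by omega)]
      simp
    exact H kv hkv pre suf hu hnp v hv2 hvsuf
  · intro H kv hkv pre suf hu hnp r hr hrsuf
    obtain ⟨s1, s2, hsuf⟩ := List.append_of_mem hrsuf
    have hu' : u = (pre ++ kv.1 :: s1) ++ r :: s2 := by
      rw [hu, hsuf]; simp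
    exact H (pre ++ kv.1 :: s1) r s2 hu' kv hkv hr (by simp)


-- per update, A's rule check equals B's streaming check
theorem check_eq (rules : List (Int × List Int)) (u : List Int) :
    aKeyLoop u rules = bScan (bRev rules) u PySem.Set.empty := by
  rw [Bool.eq_iff_iff, aKeyLoop_iff, bScan_iff, pred_iff]
  constructor
  · intro H p v s heq k hk
    rw [mem_bRev] at hk
    obtain ⟨kv, hkv, hk1, hv2⟩ := hk
    rintro (hmem | hmem)
    · simp [PySem.Set.empty] at hmem
    · exact H p v s heq kv hkv hv2 (hk1 ▸ hmem)
  · intro H p v s heq kv hkv hv2 hmem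
    exact H p v s heq kv.1 (by rw [mem_bRev]; exact ⟨kv, hkv, rfl, hv2⟩) (Or.inr hmem)

-- the two top-level folds agree step by step
theorem foldl_eq (rules : List (Int × List Int)) (us : List (List Int)) (acc : Int) :
    us.foldl (fun result update =>
      if aKeyLoop update rules then
        result + PySem.List.pyGetD update (PySem.Int.floordiv (PySem.List.len update) 2) 0
      else result) acc
    = us.foldl (fun total update =>
      if bScan (bRev rules) update PySem.Set.empty then
        total + PySem.List.pyGetD update (PySem.Int.floordiv (PySem.List.len update) 2) 0
      else total) acc := by
  induction us generalizing acc with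
  | nil => rfl
  | cons u rest ih =>
    simp only [List.foldl_cons, check_eq rules u]
    exact ih _

-- ===== VERDICT (by name: the statement is the Claim_ definition above) =====
theorem part_1_spec : Claim_equal_part_1 := by
  unfold Claim_equal_part_1
  intro input _ _
  unfold Spec_part_1 part_1 part_1_alt
  exact foldl_eq input.1 input.2 0
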